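-- pv_equiv track=rewrite | github.com/kevincrispie/SoftDesSp15 | twitter_trends/twitter_trends.py | iterated_list_splitter
-- ===== SOURCE A (Python) =====
-- def list_splitter(data_list, keyword):
-- 	"""
-- 	splits the list into 2 lists given a keyword
-- 	"""
--
-- 	for x in range(len(data_list)):
-- 		if data_list[x] == keyword:
-- 			new_list = data_list[x::]
-- 			data_list = data_list[0:x]
-- 			return data_list, new_list
--
-- def iterated_list_splitter(data_list, keywords):
-- 	"""
-- 	splits lists given a list of keywords
-- 	"""
--
-- 	list_of_all_tweets = []
-- 	list_to_split = data_list
-- 	for keyword in keywords: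
-- 		produced_list, list_to_split = list_splitter(list_to_split,keyword)
-- 		list_of_all_tweets.append(produced_list)
--
-- 	list_of_all_tweets.append(list_to_split)
-- 	return list_of_all_tweets
-- ===== SOURCE B (Python) =====
-- def iterated_list_splitter(data_list, keywords):
--     segments = []
--     current = []
--     ki = 0
--     k = len(keywords)
--     for x in data_list:
--         while ki < k and x == keywords[ki]:
--             segments.append(current)
--             current = []
--             ki += 1
--         current.append(x)
--     if ki < k:
--         raise ValueError('%r is not in list' % (keywords[ki],))
--     segments.append(current)
--     return segments
-- ===== Notes on version B (the rewrite author's own statement) =====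
-- stated objective: faster
-- what changed: Replaces A's per-keyword rescanning helper (which rescans and reslices the shrinking list, copying two new lists per keyword) with a single left-to-right pass over the data carrying the current segment and an index into the keywords, closing a segment whenever the current element equals the next pending keyword; where A dies unpacking None on a missing keyword, B raises ValueError (both excluded by Pre_).
import Mathlib
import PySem

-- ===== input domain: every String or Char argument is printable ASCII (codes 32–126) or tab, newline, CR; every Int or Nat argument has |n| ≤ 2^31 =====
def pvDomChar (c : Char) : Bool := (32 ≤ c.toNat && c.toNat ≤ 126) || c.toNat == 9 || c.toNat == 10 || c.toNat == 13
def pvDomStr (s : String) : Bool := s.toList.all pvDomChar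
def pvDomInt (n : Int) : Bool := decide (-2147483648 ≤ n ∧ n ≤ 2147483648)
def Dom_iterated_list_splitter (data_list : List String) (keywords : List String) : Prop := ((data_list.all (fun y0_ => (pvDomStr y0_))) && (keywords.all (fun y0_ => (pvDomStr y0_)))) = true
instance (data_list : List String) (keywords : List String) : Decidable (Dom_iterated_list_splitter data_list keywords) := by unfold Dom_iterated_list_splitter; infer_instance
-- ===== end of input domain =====

-- B replaces A's per-keyword rescan-and-reslice helper with one left-to-right pass over the data
-- carrying the current segment and a pending-keyword index (asymptotically faster); return values
-- proved equal wherever Python A returns; where A raises (missing keyword) B raises ValueError,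
-- and Pre_ excludes exactly those inputs.


-- ===== PORT A =====
-- list_splitter's for-loop over range(len(data_list)), as structural recursion on the index x;
-- the slices data_list[0:x] / data_list[x::] (x in range) are exactly take x / drop x.
def ls_go (dl : List String) (kw : String) (x : Nat) : Option (List String × List String) :=
  if h : x < dl.length then
    if dl[x] = kw then some (dl.take x, dl.drop x)
    else ls_go dl kw (x + 1)
  else none
termination_by dl.length - x

def list_splitter (data_list : List String) (keyword : String) : Option (List String × List String) :=
  ls_go data_list keyword 0

-- the for-loop over keywords; 'none' marks the inputs where the Python unpacks None and raises
def ils_loop (kws : List String) (acc : List (List String)) (lts : List String) :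
    Option (List (List String) × List String) :=
  match kws with
  | [] => some (acc, lts)
  | kw :: rest =>
    match list_splitter lts kw with
    | none => none
    | some (produced, newlts) => ils_loop rest (acc ++ [produced]) newlts

def iterated_list_splitter (data_list : List String) (keywords : List String) : List (List String) :=
  match ils_loop keywords [] data_list with
  | none => []          -- Python raises here; excluded by Pre_
  | some (acc, lts) => acc ++ [lts]

-- ===== PORT B =====
-- Source B's inner 'while ki < k and x == keywords[ki]' loop: close the current segment and advance ki
def adv (kws : List String) (x : String) (ki : Nat) (segs : List (List String)) (cur : List String) :
    List (List String) × List String × Nat :=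
  if h : ki < kws.length then
    if x = kws[ki] then adv kws x (ki + 1) (segs ++ [cur]) []
    else (segs, cur, ki)
  else (segs, cur, ki)
termination_by kws.length - ki

-- Source B's 'for x in data_list' loop over the state (segments, current, ki)
def bgo (kws : List String) (dl : List String) (ki : Nat) (segs : List (List String)) (cur : List String) :
    List (List String) × List String × Nat :=
  match dl with
  | [] => (segs, cur, ki)
  | x :: rest =>
    let r := adv kws x ki segs cur
    bgo kws rest r.2.2 r.1 (r.2.1 ++ [x])

def iterated_list_splitter_alt (data_list : List String) (keywords : List String) : List (List String) :=
  let r := bgo keywords data_list 0 [] []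
  if r.2.2 < keywords.length then []   -- Python B raises ValueError here; excluded by Pre_
  else r.1 ++ [r.2.1]

-- ===== PRECONDITION & SPEC =====
-- Pre_ excludes exactly the inputs where Python A raises (list_splitter returns None, which the
-- caller unpacks): some keyword does not occur in the remainder left after the previous cut.
def preB (dl : List String) (kws : List String) : Bool :=
  match kws with
  | [] => true
  | kw :: rest => (kw ∈ dl) && preB (dl.drop (dl.idxOf kw)) rest

def Pre_iterated_list_splitter (data_list : List String) (keywords : List String) : Prop :=
  preB data_list keywords = true
instance (data_list : List String) (keywords : List String) : Decidable (Pre_iterated_list_splitter data_list keywords) := by unfold Pre_iterated_list_splitter; infer_instance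

def pvWitness_iterated_list_splitter : List String × List String := (["a", "b", "c", "b"], ["b"])

def Spec_iterated_list_splitter (data_list : List String) (keywords : List String) (out : List (List String)) : Prop := out = iterated_list_splitter_alt data_list keywords
instance (data_list : List String) (keywords : List String) (out : List (List String)) : Decidable (Spec_iterated_list_splitter data_list keywords out) := by unfold Spec_iterated_list_splitter; infer_instance

-- ===== CLAIM (what is proved, stated in full; the proofs are below) =====
def Claim_equal_iterated_list_splitter : Prop := ∀ (data_list : List String) (keywords : List String), Dom_iterated_list_splitter data_list keywords → Pre_iterated_list_splitter data_list keywords → Spec_iterated_list_splitter data_list keywords (iterated_list_splitter data_list keywords)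

-- ===== LEMMAS AND PROOFS =====

-- common recursive specification: cut at the first occurrence of each keyword in turn
def specS (dl : List String) (kws : List String) : Option (List (List String)) :=
  match kws with
  | [] => some [dl]
  | kw :: rest =>
      if kw ∈ dl then (specS (dl.drop (dl.idxOf kw)) rest).map (fun xs => dl.take (dl.idxOf kw) :: xs)
      else none

-- advP/bgoP: bgo with the index ki replaced by the pending suffix of keywords (proof-only)
def advP (pend : List String) (x : String) (segs : List (List String)) (cur : List String) :
    List (List String) × List String × List String :=
  match pend with
  | [] => (segs, cur, [])
  | kw :: rest => if x = kw then advP rest x (segs ++ [cur]) [] else (segs, cur, kw :: rest)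

def bgoP (dl : List String) (pend : List String) (segs : List (List String)) (cur : List String) :
    List (List String) × List String × List String :=
  match dl with
  | [] => (segs, cur, pend)
  | x :: rest =>
    let r := advP pend x segs cur
    bgoP rest r.2.2 r.1 (r.2.1 ++ [x])

theorem ls_shift (a : String) (t : List String) (kw : String) (x : Nat) :
    ls_go (a :: t) kw (x + 1) = (ls_go t kw x).map (fun p => (a :: p.1, p.2)) := by
  fun_induction ls_go t kw x with
  | case1 x h hkw =>
      rw [ls_go]
      simp [Nat.succ_lt_succ h, hkw]
  | case2 x h hkw ih =>
      rw [ls_go]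
      simp only [List.length_cons, Nat.succ_lt_succ h, dif_pos, List.getElem_cons_succ, hkw,
        if_neg hkw]
      exact ih
  | case3 x h =>
      rw [ls_go]
      have : ¬ x + 1 < t.length + 1 := by omega
      simp [this, ls_go, h]

theorem ls_zero (dl : List String) (kw : String) :
    ls_go dl kw 0 =
      if kw ∈ dl then some (dl.take (dl.idxOf kw), dl.drop (dl.idxOf kw)) else none := by
  induction dl with
  | nil => rw [ls_go]; simp
  | cons a t ih =>
      rw [ls_go]
      by_cases hak : a = kw
      · subst hak
        simp [List.idxOf_cons_self]
      · have hne : (a == kw) = false := by simp [hak]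
        simp only [List.length_cons, Nat.succ_pos, dif_pos, List.getElem_cons_zero, if_neg hak]
        rw [ls_shift, ih, List.idxOf_cons, hne]
        by_cases hm : kw ∈ t
        · simp [hm]
        · simp [hm]
          exact fun h => hak h.symm

theorem A_eq_spec (kws : List String) : ∀ (dl : List String) (acc : List (List String)),
    (match ils_loop kws acc dl with
     | none => none
     | some (a, l) => some (a ++ [l])) = (specS dl kws).map (fun xs => acc ++ xs) := by
  induction kws with
  | nil => intro dl acc; simp [ils_loop, specS]
  | cons kw rest ih =>
      intro dl acc
      rw [ils_loop, specS, list_splitter, ls_zero]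
      by_cases hm : kw ∈ dl
      · rw [if_pos hm, if_pos hm, ih]
        cases specS (dl.drop (dl.idxOf kw)) rest with
        | none => simp
        | some xs => simp
      · rw [if_neg hm, if_neg hm]; rfl

theorem preB_some (kws : List String) : ∀ (dl : List String), preB dl kws = true →
    ∃ xs, specS dl kws = some xs := by
  induction kws with
  | nil => intro dl _; exact ⟨[dl], rfl⟩
  | cons kw rest ih =>
      intro dl h
      rw [preB, Bool.and_eq_true] at h
      obtain ⟨h1, h2⟩ := h
      have hm : kw ∈ dl := by simpa using h1
      obtain ⟨xs, hxs⟩ := ih _ h2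
      exact ⟨dl.take (dl.idxOf kw) :: xs, by rw [specS, if_pos hm, hxs]; rfl⟩

theorem adv_eq (kws : List String) (x : String) : ∀ (ki : Nat) (segs : List (List String))
    (cur : List String), ki ≤ kws.length →
    (adv kws x ki segs cur).1 = (advP (kws.drop ki) x segs cur).1 ∧
    (adv kws x ki segs cur).2.1 = (advP (kws.drop ki) x segs cur).2.1 ∧
    kws.drop (adv kws x ki segs cur).2.2 = (advP (kws.drop ki) x segs cur).2.2 ∧
    (adv kws x ki segs cur).2.2 ≤ kws.length := by
  intro ki
  induction hn : kws.length - ki generalizing ki with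
  | zero =>
      intro segs cur hle
      have hki : ki = kws.length := by omega
      subst hki
      rw [adv]
      simp [advP]
  | succ n ihn =>
      intro segs cur hle
      have hlt : ki < kws.length := by omega
      have hdrop : kws.drop ki = kws[ki] :: kws.drop (ki + 1) :=
        List.drop_eq_getElem_cons hlt
      rw [adv, dif_pos hlt, hdrop]
      by_cases hx : x = kws[ki]
      · rw [if_pos hx, advP, if_pos hx]
        exact ihn (ki + 1) (by omega) (segs ++ [cur]) [] hlt
      · rw [if_neg hx, advP, if_neg hx]
        exact ⟨rfl, rfl, hdrop, Nat.le_of_lt hlt⟩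

theorem bgo_eq_bgoP (kws : List String) : ∀ (dl : List String) (ki : Nat)
    (segs : List (List String)) (cur : List String), ki ≤ kws.length →
    (bgo kws dl ki segs cur).1 = (bgoP dl (kws.drop ki) segs cur).1 ∧
    (bgo kws dl ki segs cur).2.1 = (bgoP dl (kws.drop ki) segs cur).2.1 ∧
    kws.drop (bgo kws dl ki segs cur).2.2 = (bgoP dl (kws.drop ki) segs cur).2.2 ∧
    (bgo kws dl ki segs cur).2.2 ≤ kws.length := by
  intro dl
  induction dl with
  | nil => intro ki segs cur hle; exact ⟨rfl, rfl, rfl, hle⟩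
  | cons x rest ih =>
      intro ki segs cur hle
      obtain ⟨h1, h2, h3, h4⟩ := adv_eq kws x ki segs cur hle
      rw [bgo, bgoP]
      rw [h1, h2, ← h3]
      exact ih _ _ _ h4

theorem bgoP_spec : ∀ (dl pend : List String) (segs : List (List String)) (cur : List String),
    (∀ kw rest, pend = kw :: rest → kw ∉ cur) →
    ∀ xs, specS (cur ++ dl) pend = some xs →
    (bgoP dl pend segs cur).2.2 = [] ∧
    (bgoP dl pend segs cur).1 ++ [(bgoP dl pend segs cur).2.1] = segs ++ xs := by
  intro dl
  induction dl with
  | nil =>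
      intro pend segs cur hinv xs hxs
      cases pend with
      | nil =>
          rw [specS] at hxs
          simp only [Option.some.injEq] at hxs
          rw [bgoP]
          exact ⟨rfl, by simp [← hxs]⟩
      | cons kw rest =>
          rw [specS] at hxs
          have : kw ∉ cur ++ ([] : List String) := by
            simpa using hinv kw rest rfl
          rw [if_neg this] at hxs
          exact absurd hxs (by simp)
  | cons x rest ihdl =>
      intro pend
      induction pend generalizing x with
      | nil =>
          intro segs cur _ xs hxs
          rw [specS] at hxs
          simp only [Option.some.injEq] at hxs
          rw [bgoP]
          show (bgoP rest [] segs (cur ++ [x])).2.2 = [] ∧ _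
          exact ihdl [] segs (cur ++ [x]) (by intro kw r h; cases h) xs
            (by rw [specS]; simp [← hxs])
      | cons kw pend' ihp =>
          intro segs cur hinv xs hxs
          have hkc : kw ∉ cur := hinv kw pend' rfl
          by_cases hx : x = kw
          · -- one step of the while loop: close cur, pop kw, re-examine x
            subst hx
            have hstep : bgoP (x :: rest) (x :: pend') segs cur =
                bgoP (x :: rest) pend' (segs ++ [cur]) [] := by
              rw [bgoP, bgoP]
              show (let r := advP (x :: pend') x segs cur;
                    bgoP rest r.2.2 r.1 (r.2.1 ++ [x])) = _
              rw [advP, if_pos rfl]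
            rw [hstep]
            -- first occurrence of x in cur ++ x :: rest is at |cur|
            have hmem : x ∈ cur ++ x :: rest := by simp
            have hidx : (cur ++ x :: rest).idxOf x = cur.length := by
              rw [List.idxOf_append_of_notMem hkc]
              simp [List.idxOf_cons_self]
            rw [specS, if_pos hmem, hidx] at hxs
            have htake : (cur ++ x :: rest).take cur.length = cur := by
              simp [List.take_append]
            have hdrop : (cur ++ x :: rest).drop cur.length = x :: rest := by
              simp [List.drop_append]
            rw [htake, hdrop] at hxs
            cases hxs' : specS (x :: rest) pend' with
            | none => rw [hxs'] at hxs; exact absurd hxs (by simp)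
            | some xs' =>
                rw [hxs'] at hxs
                simp only [Option.map_some, Option.some.injEq] at hxs
                obtain ⟨hh1, hh2⟩ := ihp x (segs ++ [cur]) [] (by intro kw r h; simp) xs'
                  (by simpa using hxs')
                refine ⟨hh1, ?_⟩
                rw [hh2, ← hxs]
                simp
          · -- x does not match the next keyword: it joins the current segment
            have hstep : bgoP (x :: rest) (kw :: pend') segs cur =
                bgoP rest (kw :: pend') segs (cur ++ [x]) := by
              rw [bgoP]
              show (let r := advP (kw :: pend') x segs cur;
                    bgoP rest r.2.2 r.1 (r.2.1 ++ [x])) = _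
              rw [advP, if_neg hx]
            rw [hstep]
            refine ihdl (kw :: pend') segs (cur ++ [x]) ?_ xs ?_
            · intro kw' r h
              cases h
              simp only [List.mem_append, List.mem_singleton]
              rintro (h1 | h2)
              · exact hkc h1
              · exact hx h2.symm
            · rw [← hxs]
              congr 1
              simp

theorem main_eq (data_list keywords : List String)
    (hpre : preB data_list keywords = true) :
    iterated_list_splitter data_list keywords = iterated_list_splitter_alt data_list keywords := by
  obtain ⟨xs, hxs⟩ := preB_some keywords data_list hpre
  have hA := A_eq_spec keywords data_list []
  rw [hxs] at hA
  simp only [Option.map_some, List.nil_append] at hA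
  have hB : iterated_list_splitter_alt data_list keywords = xs := by
    obtain ⟨h1, h2, h3, h4⟩ := bgo_eq_bgoP keywords data_list 0 [] [] (Nat.zero_le _)
    rw [List.drop_zero] at h1 h2 h3
    obtain ⟨hp1, hp2⟩ := bgoP_spec data_list keywords [] [] (by intro kw r h; simp) xs
      (by simpa using hxs)
    rw [hp1] at h3
    have hlen : (bgo keywords data_list 0 [] []).2.2 = keywords.length := by
      have := List.drop_eq_nil_iff.mp h3
      omega
    rw [iterated_list_splitter_alt]
    simp only [hlen, Nat.lt_irrefl, if_neg (Nat.lt_irrefl keywords.length)]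
    rw [h1, h2, hp2]
    simp
  rw [iterated_list_splitter, hB]
  cases hloop : ils_loop keywords [] data_list with
  | none => rw [hloop] at hA; exact absurd hA (by simp)
  | some p =>
      rw [hloop] at hA
      obtain ⟨a, l⟩ := p
      simpa using hA

-- ===== VERDICT (by name: the statement is the Claim_ definition above) =====
theorem iterated_list_splitter_spec : Claim_equal_iterated_list_splitter := by
  intro data_list keywords _ hpre
  exact main_eq data_list keywords hpre
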